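-- pv_equiv track=rewrite | github.com/AndrewsTallon/EAST | east/tests/ssl_test.py | _extract_protocol_details
-- ===== SOURCE A (Python) =====
-- def _extract_protocol_details(endpoint: dict) -> dict[str, bool]:
--     """Extract TLS protocol support from endpoint data."""
--     details = endpoint.get("details", {})
--     protocols_data = details.get("protocols", [])
--
--     protocol_map = {
--         "SSL 2.0": False,
--         "SSL 3.0": False,
--         "TLS 1.0": False,
--         "TLS 1.1": False,
--         "TLS 1.2": False,
--         "TLS 1.3": False,
--     }
--
--     for proto in protocols_data:
--         name = proto.get("name", "")
--         version = proto.get("version", "")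
--         key = f"{name} {version}"
--         if key in protocol_map:
--             protocol_map[key] = True
--
--     return protocol_map
-- ===== SOURCE B (Python) =====
-- def _extract_protocol_details(endpoint: dict) -> dict[str, bool]:
--     """Extract TLS protocol support from endpoint data."""
--     details = endpoint.get("details", {})
--     protocols_data = details.get("protocols", [])
--     present = {f"{p.get('name', '')} {p.get('version', '')}" for p in protocols_data}
--     keys = ["SSL 2.0", "SSL 3.0", "TLS 1.0", "TLS 1.1", "TLS 1.2", "TLS 1.3"]
--     return {k: k in present for k in keys}
-- ===== Notes on version B (the rewrite author's own statement) =====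
-- stated objective: idiomatic
-- what changed: Instead of initialising a six-key dict and flipping entries to True while scanning the protocol list, B builds a set of the protocol identifiers present and then produces the result with one dict comprehension over the fixed ordered key list via membership tests.
import Mathlib
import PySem

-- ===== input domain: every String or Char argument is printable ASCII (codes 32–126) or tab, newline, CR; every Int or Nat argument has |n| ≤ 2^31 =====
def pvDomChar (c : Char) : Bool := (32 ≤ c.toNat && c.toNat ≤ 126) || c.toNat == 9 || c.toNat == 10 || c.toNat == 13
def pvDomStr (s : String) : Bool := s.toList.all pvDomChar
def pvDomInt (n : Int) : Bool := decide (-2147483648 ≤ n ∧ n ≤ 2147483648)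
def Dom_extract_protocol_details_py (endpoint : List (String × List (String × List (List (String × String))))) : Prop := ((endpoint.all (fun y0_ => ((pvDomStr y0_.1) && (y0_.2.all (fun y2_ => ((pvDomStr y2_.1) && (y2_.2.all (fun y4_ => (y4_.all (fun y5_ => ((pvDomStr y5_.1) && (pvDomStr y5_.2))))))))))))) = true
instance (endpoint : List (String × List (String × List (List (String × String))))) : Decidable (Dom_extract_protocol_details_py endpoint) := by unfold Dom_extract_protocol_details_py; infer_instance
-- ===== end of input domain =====

-- B replaces A's flip-entries-while-scanning dict accumulator with a set of present
-- protocol identifiers plus one membership pass over the fixed key list (idiomatic).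


-- ===== PORT A =====
def extract_protocol_details_py (endpoint : List (String × List (String × List (List (String × String))))) : List (String × Bool) :=
  let details := (PySem.Dict.mk endpoint).getD "details" []
  let protocols_data := (PySem.Dict.mk details).getD "protocols" []
  let protocol_map : PySem.Dict String Bool := PySem.Dict.mk
    [("SSL 2.0", false), ("SSL 3.0", false), ("TLS 1.0", false),
     ("TLS 1.1", false), ("TLS 1.2", false), ("TLS 1.3", false)]
  let final := protocols_data.foldl (fun d proto =>
    let name := (PySem.Dict.mk proto).getD "name" ""
    let version := (PySem.Dict.mk proto).getD "version" ""
    let key := name ++ " " ++ version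
    if d.contains key then d.insert key true else d) protocol_map
  final.items

-- ===== PORT B =====
def extract_protocol_details_py_alt (endpoint : List (String × List (String × List (List (String × String))))) : List (String × Bool) :=
  let details := (PySem.Dict.mk endpoint).getD "details" []
  let protocols_data := (PySem.Dict.mk details).getD "protocols" []
  let present : PySem.Set String := PySem.Set.ofList (protocols_data.map (fun p =>
    (PySem.Dict.mk p).getD "name" "" ++ " " ++ (PySem.Dict.mk p).getD "version" ""))
  let keys : List String := ["SSL 2.0", "SSL 3.0", "TLS 1.0", "TLS 1.1", "TLS 1.2", "TLS 1.3"]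
  keys.map (fun k => (k, present.contains k))

-- ===== PRECONDITION & SPEC =====
def Spec_extract_protocol_details_py (endpoint : List (String × List (String × List (List (String × String))))) (out : List (String × Bool)) : Prop := out = extract_protocol_details_py_alt endpoint
instance (endpoint : List (String × List (String × List (List (String × String))))) (out : List (String × Bool)) : Decidable (Spec_extract_protocol_details_py endpoint out) := by unfold Spec_extract_protocol_details_py; infer_instance

-- ===== CLAIM (what is proved, stated in full; the proofs are below) =====
def Claim_equal_extract_protocol_details_py : Prop := ∀ (endpoint : List (String × List (String × List (List (String × String))))), Dom_extract_protocol_details_py endpoint → Spec_extract_protocol_details_py endpoint (extract_protocol_details_py endpoint)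

-- ===== LEMMAS AND PROOFS =====

-- The fixed six-key template both programs enumerate.
def pvKeys : List String := ["SSL 2.0", "SSL 3.0", "TLS 1.0", "TLS 1.1", "TLS 1.2", "TLS 1.3"]

-- One step of A's loop on a dict whose items are pvKeys tagged by f.
lemma pv_step (f : String → Bool) (key : String) :
    (if (PySem.Dict.mk (pvKeys.map (fun k => (k, f k)))).contains key
     then (PySem.Dict.mk (pvKeys.map (fun k => (k, f k)))).insert key true
     else PySem.Dict.mk (pvKeys.map (fun k => (k, f k))))
    = PySem.Dict.mk (pvKeys.map (fun k => (k, f k || (k == key)))) := by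
  by_cases h : (PySem.Dict.mk (pvKeys.map (fun k => (k, f k)))).contains key
  · rw [if_pos h]
    simp only [PySem.Dict.insert, h, if_pos, List.map_map]
    congr 1
    refine List.map_congr_left (fun k _ => ?_)
    by_cases hk : k = key
    · simp [hk]
    · simp [hk]
  · rw [if_neg h]
    congr 1
    refine List.map_congr_left (fun k hk => ?_)
    have hne : k ≠ key := by
      intro hkk
      apply h
      simp only [PySem.Dict.contains, List.any_map, List.any_eq_true]
      exact ⟨k, hk, by simp [hkk]⟩
    simp [hne]

-- A's whole loop over the protocol list, as a membership predicate over the mapped keys.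
lemma pv_loop {β : Type} (L : List β) (g : β → String) (f : String → Bool) :
    (L.foldl (fun d p => if d.contains (g p) then d.insert (g p) true else d)
       (PySem.Dict.mk (pvKeys.map (fun k => (k, f k)))))
    = PySem.Dict.mk (pvKeys.map (fun k => (k, f k || (L.map g).contains k))) := by
  induction L generalizing f with
  | nil => simp
  | cons p L ih =>
    simp only [List.foldl_cons]
    rw [pv_step f (g p), ih]
    congr 1
    refine List.map_congr_left (fun k _ => ?_)
    by_cases h : k = g p
    · simp [h, Bool.or_comm]
    · simp [beq_eq_false_iff_ne.mpr h, h]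

-- Set membership over the built set is plain list membership.
lemma pv_set_contains (ks : List String) (k : String) :
    (PySem.Set.ofList ks).contains k = ks.contains k := by
  simp only [PySem.Set.contains]
  by_cases h : k ∈ ks
  · simp [(PySem.Set.mem_ofList ks k).2 h, h]
  · have : k ∉ PySem.Set.ofList ks := fun hh => h ((PySem.Set.mem_ofList ks k).1 hh)
    simp [this, h]

-- Both ports, reduced to the same membership map over pvKeys.
lemma pv_main (L : List (List (String × String))) :
    (L.foldl (fun d proto =>
        (fun (d : PySem.Dict String Bool) key =>
          if d.contains key then d.insert key true else d) d
          ((PySem.Dict.mk proto).getD "name" "" ++ " " ++ (PySem.Dict.mk proto).getD "version" ""))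
      (PySem.Dict.mk
        [("SSL 2.0", false), ("SSL 3.0", false), ("TLS 1.0", false),
         ("TLS 1.1", false), ("TLS 1.2", false), ("TLS 1.3", false)])).items
    = pvKeys.map (fun k => (k,
        (PySem.Set.ofList (L.map (fun p =>
          (PySem.Dict.mk p).getD "name" "" ++ " " ++ (PySem.Dict.mk p).getD "version" ""))).contains k)) := by
  have h0 : (PySem.Dict.mk
      [("SSL 2.0", false), ("SSL 3.0", false), ("TLS 1.0", false),
       ("TLS 1.1", false), ("TLS 1.2", false), ("TLS 1.3", false)])
      = PySem.Dict.mk (pvKeys.map (fun k => (k, (fun _ => false) k))) := by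
    simp [pvKeys]
  rw [h0, pv_loop L (fun p => (PySem.Dict.mk p).getD "name" "" ++ " " ++ (PySem.Dict.mk p).getD "version" "")]
  simp only [Bool.false_or]
  exact List.map_congr_left (fun k _ => by rw [pv_set_contains])

-- ===== VERDICT (by name: the statement is the Claim_ definition above) =====
theorem extract_protocol_details_py_spec : Claim_equal_extract_protocol_details_py := by
  intro endpoint _
  unfold Spec_extract_protocol_details_py
  exact pv_main ((PySem.Dict.mk ((PySem.Dict.mk endpoint).getD "details" [])).getD "protocols" [])
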